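-- pv_equiv track=rewrite | github.com/smpurkis/autocompile | tests/test_main.py | lists_py
-- ===== SOURCE A (Python) =====
-- def lists_py(m):
--     x = []
--     for i in range(m):
--         y = []
--         for j in range(m):
--             y.append(j)
--         x.append(y)
--     return x
-- ===== SOURCE B (Python) =====
-- def lists_py(m):
--     row = list(range(m))
--     return [row[:] for _ in range(m)]
-- ===== Notes on version B (the rewrite author's own statement) =====
-- stated objective: simpler
-- what changed: B builds the 0..m-1 row once with list(range(m)) and replicates it with per-row copies, instead of re-appending every element inside a nested loop.
import Mathlib
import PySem

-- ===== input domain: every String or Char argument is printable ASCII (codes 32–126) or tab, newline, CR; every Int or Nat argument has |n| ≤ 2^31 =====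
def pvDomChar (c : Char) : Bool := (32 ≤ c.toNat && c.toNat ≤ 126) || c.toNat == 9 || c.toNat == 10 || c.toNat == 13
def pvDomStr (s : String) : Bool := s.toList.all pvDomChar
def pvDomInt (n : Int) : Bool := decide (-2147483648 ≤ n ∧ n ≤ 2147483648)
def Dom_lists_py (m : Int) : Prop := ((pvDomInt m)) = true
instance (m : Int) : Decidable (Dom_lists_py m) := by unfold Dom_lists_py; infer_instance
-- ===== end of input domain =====

-- ===== PORT A =====
-- header: B precomputes the row once and replicates it with per-row copies (simpler decomposition); same return value.
def lists_py (m : Int) : List (List Int) :=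
  (PySem.List.pyRange 0 m 1).foldl
    (fun x _i =>
      x ++ [(PySem.List.pyRange 0 m 1).foldl (fun y j => y ++ [j]) []])
    []

-- ===== PORT B =====
def lists_py_alt (m : Int) : List (List Int) :=
  let row := PySem.List.pyRange 0 m 1
  (PySem.List.pyRange 0 m 1).map (fun _ => row)

-- ===== PRECONDITION & SPEC =====
def Spec_lists_py (m : Int) (out : List (List Int)) : Prop := out = lists_py_alt m
instance (m : Int) (out : List (List Int)) : Decidable (Spec_lists_py m out) := by unfold Spec_lists_py; infer_instance

-- ===== CLAIM (what is proved, stated in full; the proofs are below) =====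
def Claim_equal_lists_py : Prop := ∀ (m : Int), Dom_lists_py m → Spec_lists_py m (lists_py m)

-- ===== LEMMAS AND PROOFS =====

-- ===== VERDICT (by name: the statement is the Claim_ definition above) =====
lemma foldl_app_id (l acc : List Int) :
    l.foldl (fun y j => y ++ [j]) acc = acc ++ l := by
  induction l generalizing acc with
  | nil => simp
  | cons a t ih => simp [List.foldl, ih, List.append_assoc]

lemma foldl_app_const (l : List Int) (c : List Int) (acc : List (List Int)) :
    l.foldl (fun x _ => x ++ [c]) acc = acc ++ l.map (fun _ => c) := by
  induction l generalizing acc with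
  | nil => simp
  | cons a t ih => simp [List.foldl, ih, List.append_assoc]

-- ===== VERDICT =====
theorem lists_py_spec : Claim_equal_lists_py := by
  intro m _
  unfold Spec_lists_py lists_py lists_py_alt
  rw [foldl_app_const, foldl_app_id]
  simp
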